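-- pv_equiv track=rewrite | github.com/JasonAskew/knowledge | knowledge_test_agent/test_validation_fix.py | normalize_document_name
-- ===== SOURCE A (Python) =====
-- def normalize_document_name(doc_name):
--     """Normalize document name by stripping common file extensions"""
--     if not doc_name:
--         return ""
--
--     # Common file extensions to strip
--     extensions = ['.pdf', '.PDF', '.docx', '.DOCX', '.doc', '.DOC',
--                   '.txt', '.TXT', '.html', '.HTML', '.htm', '.HTM']
--
--     normalized = doc_name
--     for ext in extensions:
--         if normalized.endswith(ext):
--             normalized = normalized[:-len(ext)]
--             break
--
--     return normalized.lower()
-- ===== SOURCE B (Python) =====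
-- def normalize_document_name(doc_name):
--     """Normalize document name by stripping common file extensions"""
--     if not doc_name:
--         return ""
--
--     EXTENSIONS = {'.pdf', '.PDF', '.docx', '.DOCX', '.doc', '.DOC',
--                   '.txt', '.TXT', '.html', '.HTML', '.htm', '.HTM'}
--
--     head, sep, tail = doc_name.rpartition('.')
--     stripped = head if sep and ('.' + tail) in EXTENSIONS else doc_name
--     return stripped.lower()
-- ===== Notes on version B (the rewrite author's own statement) =====
-- stated objective: idiomatic
-- what changed: Replaces the 12-iteration suffix-scan loop by a single rpartition at the last dot plus one set-membership test of the dot-prefixed tail.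
import Mathlib
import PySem

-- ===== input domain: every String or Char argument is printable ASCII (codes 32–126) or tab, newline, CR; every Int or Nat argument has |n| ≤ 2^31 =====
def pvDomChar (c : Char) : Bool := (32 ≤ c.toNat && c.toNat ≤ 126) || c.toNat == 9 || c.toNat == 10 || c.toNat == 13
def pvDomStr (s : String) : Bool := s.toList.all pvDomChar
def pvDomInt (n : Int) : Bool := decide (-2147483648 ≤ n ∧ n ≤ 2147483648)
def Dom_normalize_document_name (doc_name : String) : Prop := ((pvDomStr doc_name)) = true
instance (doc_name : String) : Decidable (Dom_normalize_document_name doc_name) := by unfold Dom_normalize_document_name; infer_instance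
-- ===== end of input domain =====

-- B replaces A's 12-iteration suffix-scan loop by one rpartition at the last dot plus a set
-- membership test of the dot-prefixed tail (objective: idiomatic); same return value everywhere.

-- ===== PORT A =====
def pvExtensions : List String :=
  [".pdf", ".PDF", ".docx", ".DOCX", ".doc", ".DOC",
   ".txt", ".TXT", ".html", ".HTML", ".htm", ".HTM"]

-- the 'for ext in extensions: if … break' loop of A
def pvStripLoop : List String → String → String
  | [], normalized => normalized
  | ext :: rest, normalized =>
    if PySem.Str.endswith normalized ext then
      PySem.Str.slice normalized none (some (-(PySem.Str.len ext)))
    else pvStripLoop rest normalized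

def normalize_document_name (doc_name : String) : String :=
  if doc_name = "" then ""
  else PySem.Str.lower (pvStripLoop pvExtensions doc_name)

-- ===== PORT B =====
def pvExtSet : PySem.Set String :=
  PySem.Set.ofList
    [".pdf", ".PDF", ".docx", ".DOCX", ".doc", ".DOC",
     ".txt", ".TXT", ".html", ".HTML", ".htm", ".HTM"]

-- hand port of doc_name.rpartition with a single dot separator; exact: when s contains no dot
-- it returns two empty strings and s, else (head, sep, tail) split at the LAST dot
def pvRpartitionDot (s : String) : String × String × String :=
  let r := s.toList.reverse
  let t := r.takeWhile (fun c => c != '.')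
  if t.length = r.length then ("", "", s)
  else (String.ofList ((r.drop (t.length + 1)).reverse), ".", String.ofList t.reverse)

def normalize_document_name_alt (doc_name : String) : String :=
  if doc_name = "" then ""
  else
    let p := pvRpartitionDot doc_name
    let stripped :=
      if p.2.1 ≠ "" ∧ PySem.Set.contains pvExtSet ("." ++ p.2.2) = true then p.1 else doc_name
    PySem.Str.lower stripped

-- ===== PRECONDITION & SPEC =====
def Spec_normalize_document_name (doc_name : String) (out : String) : Prop := out = normalize_document_name_alt doc_name
instance (doc_name : String) (out : String) : Decidable (Spec_normalize_document_name doc_name out) := by unfold Spec_normalize_document_name; infer_instance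

-- ===== CLAIM (what is proved, stated in full; the proofs are below) =====
def Claim_equal_normalize_document_name : Prop := ∀ (doc_name : String), Dom_normalize_document_name doc_name → Spec_normalize_document_name doc_name (normalize_document_name doc_name)

-- ===== LEMMAS AND PROOFS =====

-- splitting a list at a distinguished failing element
theorem pv_takeWhile_split {α : Type} (p : α → Bool) (xs ys : List α) (y : α)
    (h : ∀ c ∈ xs, p c = true) (hy : p y = false) :
    (xs ++ y :: ys).takeWhile p = xs ∧ (xs ++ y :: ys).dropWhile p = y :: ys := by
  induction xs with
  | nil => simp [hy]
  | cons a xs ih =>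
    have ha : p a = true := h a (by simp)
    have := ih (fun c hc => h c (by simp [hc]))
    simp [ha, this.1, this.2]

-- '.'::te is a suffix of L  ↔  the reverse-scan of L stops exactly at te
theorem pv_suffix_iff (L te : List Char) (hte : ∀ c ∈ te, c ≠ '.') :
    ('.' :: te) <:+ L ↔
      (L.reverse.takeWhile (fun c => c != '.') = te.reverse ∧
       L.reverse.dropWhile (fun c => c != '.') ≠ []) := by
  constructor
  · rintro ⟨u, hu⟩
    have hrev : L.reverse = te.reverse ++ '.' :: u.reverse := by
      rw [← hu]; simp
    have hall : ∀ c ∈ te.reverse, (c != '.') = true := by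
      intro c hc
      simpa using hte c (by simpa using hc)
    have := pv_takeWhile_split (fun c => c != '.') te.reverse u.reverse '.' hall (by simp)
    rw [hrev]
    exact ⟨this.1, by rw [this.2]; simp⟩
  · rintro ⟨htw, hdw⟩
    obtain ⟨c, rest, hcr⟩ := List.exists_cons_of_ne_nil hdw
    have hc : (c != '.') = false := by
      have := List.head_dropWhile_not (fun c => c != '.') (l := L.reverse) (by simp [hdw])
      simpa [hcr] using this
    have hcd : c = '.' := by simpa using hc
    have hL : L.reverse = te.reverse ++ '.' :: rest := by
      conv_lhs => rw [← List.takeWhile_append_dropWhile (p := fun c => c != '.') (l := L.reverse)]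
      rw [htw, hcr, hcd]
    refine ⟨rest.reverse, ?_⟩
    have := congrArg List.reverse hL
    simpa using this.symm

-- every extension in A's list is '.' followed by a nonempty dot-free tail
theorem pv_ext_shape : ∀ e ∈ pvExtensions,
    e.toList.head? = some '.' ∧ e.toList.tail.all (fun c => c != '.') = true ∧ e.toList ≠ [] := by
  decide

-- A's loop when nothing matches
theorem pv_stripLoop_nomatch (es : List String) (s : String)
    (h : ∀ e ∈ es, PySem.Str.endswith s e = false) : pvStripLoop es s = s := by
  induction es with
  | nil => rfl
  | cons e es ih =>
    have he := h e (by simp)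
    simp only [pvStripLoop]
    rw [if_neg (by simp only [he]; decide)]
    exact ih (fun e' he' => h e' (by simp [he']))

-- A's loop when exactly one extension matches
theorem pv_stripLoop_first (es : List String) (s cand : String)
    (hmem : cand ∈ es) (hm : PySem.Str.endswith s cand = true)
    (huniq : ∀ e ∈ es, PySem.Str.endswith s e = true → e = cand) :
    pvStripLoop es s = PySem.Str.slice s none (some (-(PySem.Str.len cand))) := by
  induction es with
  | nil => cases hmem
  | cons e es ih =>
    by_cases he : PySem.Str.endswith s e = true
    · have : e = cand := huniq e (by simp) he
      subst this
      simp only [pvStripLoop]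
      rw [if_pos he]
    · have hec : e ≠ cand := fun h => he (h ▸ hm)
      have hmem' : cand ∈ es := by
        cases hmem with
        | head => exact absurd rfl hec
        | tail _ h => exact h
      simp only [pvStripLoop]
      rw [if_neg he]
      exact ih hmem' (fun e' he' hm' => huniq e' (by simp [he']) hm')

-- endswith as a list-suffix statement
theorem pv_endswith_iff (s e : String) :
    PySem.Str.endswith s e = true ↔ e.toList <:+ s.toList := by
  rw [PySem.Str.endswith_eq, PySem.Chars.endswith_iff]

-- the core equality, before lowercasing
theorem pv_strip_eq (s : String) :
    pvStripLoop pvExtensions s =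
      (if (pvRpartitionDot s).2.1 ≠ "" ∧
          PySem.Set.contains pvExtSet ("." ++ (pvRpartitionDot s).2.2) = true
       then (pvRpartitionDot s).1 else s) := by
  set R := s.toList.reverse with hR
  set t := R.takeWhile (fun c => c != '.') with ht
  have hlen : t.length + (R.dropWhile (fun c => c != '.')).length = R.length := by
    rw [ht, ← List.length_append, List.takeWhile_append_dropWhile]
  by_cases hdw : R.dropWhile (fun c => c != '.') = []
  · -- no dot in s: rpartition returns ('', '', s); no extension matches
    have hlt : t.length = R.length := by
      rw [hdw] at hlen; simpa using hlen
    have hrp : pvRpartitionDot s = ("", "", s) := by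
      simp only [pvRpartitionDot]
      rw [← hR, ← ht, if_pos hlt]
    have hno : ∀ e ∈ pvExtensions, PySem.Str.endswith s e = false := by
      intro e he
      obtain ⟨hh, hall, hne⟩ := pv_ext_shape e he
      by_contra hb
      have hb' : PySem.Str.endswith s e = true := by
        cases hx : PySem.Str.endswith s e
        · exact absurd hx hb
        · rfl
      have hsuf : e.toList <:+ s.toList := (pv_endswith_iff s e).mp hb'
      have hmemdot : '.' ∈ s.toList := by
        have : '.' ∈ e.toList := by
          cases hx : e.toList with
          | nil => exact absurd hx hne
          | cons a l =>
            rw [hx] at hh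
            simp at hh
            simp [hh]
        exact hsuf.subset this
      have : (('.' : Char) != '.') = true :=
        (List.dropWhile_eq_nil_iff.mp hdw) '.' (by rw [hR]; simpa using hmemdot)
      simp at this
    rw [pv_stripLoop_nomatch _ _ hno, hrp]
    simp
  · -- s has a dot: rpartition splits at the last one
    have hlt : t.length ≠ R.length := by
      intro hl
      have : (R.dropWhile (fun c => c != '.')).length = 0 := by omega
      exact hdw (List.eq_nil_of_length_eq_zero this)
    have hrp : pvRpartitionDot s =
        (String.ofList ((R.drop (t.length + 1)).reverse), ".", String.ofList t.reverse) := by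
      simp only [pvRpartitionDot]
      rw [← hR, ← ht, if_neg hlt]
    set cand : String := "." ++ String.ofList t.reverse with hcand
    have hcl : cand.toList = '.' :: t.reverse := by simp [hcand]
    have htall : ∀ c ∈ t.reverse, c ≠ '.' := by
      intro c hc
      have hc' : c ∈ t := by simpa using hc
      rw [ht] at hc'
      have := List.mem_takeWhile_imp hc'
      simpa using this
    -- uniqueness: any matching extension IS cand
    have huniq : ∀ e ∈ pvExtensions, PySem.Str.endswith s e = true → e = cand := by
      intro e he hm
      obtain ⟨hh, hall, hne⟩ := pv_ext_shape e he
      obtain ⟨a, te, hx⟩ : ∃ a te, e.toList = a :: te := by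
        cases hx : e.toList with
        | nil => exact absurd hx hne
        | cons a l => exact ⟨a, l, rfl⟩
      have ha : a = '.' := by rw [hx] at hh; simp at hh; exact hh
      subst ha
      have htedf : ∀ c ∈ te, c ≠ '.' := by
        intro c hc
        have h2 := hall
        rw [hx] at h2
        simp at h2
        have := h2 c hc
        simpa using this
      have hsuf : ('.' :: te) <:+ s.toList := by
        rw [← hx]; exact (pv_endswith_iff s e).mp hm
      have hsp := (pv_suffix_iff s.toList te htedf).mp hsuf
      have hte : te.reverse = t := by rw [← hR, ← ht] at hsp; exact hsp.1.symm
      have hteq : te = t.reverse := by rw [← hte]; simp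
      have : e.toList = cand.toList := by rw [hx, hcl, hteq]
      exact String.toList_inj.mp this
    by_cases hc : PySem.Set.contains pvExtSet cand = true
    · -- cand is one of the 12: A strips it, B returns head
      have hmem : cand ∈ pvExtensions := by
        have h1 : cand ∈ (pvExtSet : List String) := List.contains_iff_mem.mp hc
        have := (PySem.Set.mem_ofList _ cand).mp h1
        simpa [pvExtensions] using this
      have hsuf : cand.toList <:+ s.toList := by
        rw [hcl]
        refine (pv_suffix_iff s.toList t.reverse htall).mpr ⟨?_, ?_⟩
        · rw [← hR, ← ht]; simp
        · rw [← hR]; exact hdw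
      have hm : PySem.Str.endswith s cand = true := (pv_endswith_iff s cand).mpr hsuf
      rw [pv_stripLoop_first pvExtensions s cand hmem hm huniq, hrp]
      rw [if_pos ⟨by simp, by simpa [hcand] using hc⟩]
      apply String.toList_inj.mp
      rw [PySem.Str.toList_slice, PySem.Chars.slice_eq_listSlice]
      have hclen : cand.toList.length = t.length + 1 := by rw [hcl]; simp
      rw [show (PySem.Str.len cand) = ((t.length + 1 : Nat) : Int) by
        rw [PySem.Str.len_eq, hclen]]
      rw [PySem.List.slice_to_neg_natCast _ _ (by omega)]
      rw [hR, List.reverse_drop, List.reverse_reverse, List.length_reverse]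
      simp
    · -- cand is not an extension: nothing matches, both sides return s
      have hno : ∀ e ∈ pvExtensions, PySem.Str.endswith s e = false := by
        intro e he
        cases hx : PySem.Str.endswith s e
        · rfl
        · exfalso
          have heq : e = cand := huniq e he hx
          apply hc
          apply List.contains_iff_mem.mpr
          apply (PySem.Set.mem_ofList _ cand).mpr
          rw [← heq]
          simpa [pvExtensions] using he
      rw [pv_stripLoop_nomatch _ _ hno, hrp]
      rw [if_neg]
      rintro ⟨-, hmem⟩
      exact hc (by simpa [hcand] using hmem)

-- ===== VERDICT (by name: the statement is the Claim_ definition above) =====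
theorem normalize_document_name_spec : Claim_equal_normalize_document_name := by
  intro s _
  unfold Spec_normalize_document_name normalize_document_name normalize_document_name_alt
  by_cases hs : s = ""
  · simp [hs]
  · simp only [if_neg hs]
    exact congrArg PySem.Str.lower (pv_strip_eq s)
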